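-- pv_equiv track=rewrite | github.com/fabiansato/Python-Ejercicios | clases/clase 13/productodeMedios.py | productoDeMedios
-- ===== SOURCE A (Python) =====
-- def productoDeMedios(n):
--     fin=n
--     suma=0
--     if (n%2==0):
--         mitad=n//2
--     else:
--         mitad=n//2+1
--     for i in range(1,mitad+1):
--         suma=suma+i*(fin)
--         fin=fin-1
--     return (suma)
-- ===== SOURCE B (Python) =====
-- def productoDeMedios(n):
--     m = (n + 1) // 2
--     if m < 1:
--         return 0
--     return (n + 1) * m * (m + 1) // 2 - m * (m + 1) * (2 * m + 1) // 6
-- ===== Notes on version B (the rewrite author's own statement) =====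
-- stated objective: faster
-- what changed: Replaced the O(n) accumulation loop by the closed-form polynomial (Gauss and sum-of-squares formulas) evaluated in O(1).
import Mathlib
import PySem

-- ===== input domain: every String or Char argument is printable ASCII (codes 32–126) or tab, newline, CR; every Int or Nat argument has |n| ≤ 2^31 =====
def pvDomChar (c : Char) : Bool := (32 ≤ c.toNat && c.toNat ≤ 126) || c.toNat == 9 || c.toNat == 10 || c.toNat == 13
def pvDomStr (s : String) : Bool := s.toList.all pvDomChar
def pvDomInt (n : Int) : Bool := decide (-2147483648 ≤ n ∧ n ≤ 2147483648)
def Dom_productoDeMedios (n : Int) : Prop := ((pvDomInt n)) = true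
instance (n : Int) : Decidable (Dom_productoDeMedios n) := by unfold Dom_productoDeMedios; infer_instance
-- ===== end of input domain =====

-- B replaces A's O(n) loop with the closed-form polynomial, an asymptotic speed-up.

-- ===== PORT A =====
def productoDeMedios (n : Int) : Int :=
  let fin : Int := n
  let suma : Int := 0
  let mitad : Int :=
    if PySem.Int.mod n 2 = 0 then PySem.Int.floordiv n 2 else PySem.Int.floordiv n 2 + 1
  let st := (PySem.List.pyRange 1 (mitad + 1) 1).foldl
    (fun (st : Int × Int) i => (st.1 + i * st.2, st.2 - 1)) (suma, fin)
  st.1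

-- ===== PORT B =====
def productoDeMedios_alt (n : Int) : Int :=
  let m := PySem.Int.floordiv (n + 1) 2
  if m < 1 then 0
  else PySem.Int.floordiv ((n + 1) * m * (m + 1)) 2
       - PySem.Int.floordiv (m * (m + 1) * (2 * m + 1)) 6

-- ===== PRECONDITION & SPEC =====
def Spec_productoDeMedios (n : Int) (out : Int) : Prop := out = productoDeMedios_alt n
instance (n : Int) (out : Int) : Decidable (Spec_productoDeMedios n out) := by unfold Spec_productoDeMedios; infer_instance

-- ===== CLAIM (what is proved, stated in full; the proofs are below) =====
def Claim_equal_productoDeMedios : Prop := ∀ (n : Int), Dom_productoDeMedios n → Spec_productoDeMedios n (productoDeMedios n)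

-- ===== LEMMAS AND PROOFS =====

-- A's "mitad" is ⌈n/2⌉ = (n+1)//2
theorem mitad_eq (n : Int) :
    (if PySem.Int.mod n 2 = 0 then PySem.Int.floordiv n 2 else PySem.Int.floordiv n 2 + 1)
      = PySem.Int.floordiv (n + 1) 2 := by
  rw [PySem.Int.mod_eq_emod_of_pos (by norm_num : (0:Int) < 2),
      PySem.Int.floordiv_eq_ediv_of_pos (b := 2) (by norm_num),
      PySem.Int.floordiv_eq_ediv_of_pos (b := 2) (by norm_num)]
  split_ifs with h <;> omega

-- A's loop over range(1, m+1): invariant for both state components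
theorem loop_closed (m : Nat) (n : Int) :
    (PySem.List.pyRange 1 ((m : Int) + 1) 1).foldl
        (fun (st : Int × Int) i => (st.1 + i * st.2, st.2 - 1)) (0, n)
      = (((PySem.List.pyRange 1 ((m : Int) + 1) 1).foldl
          (fun (st : Int × Int) i => (st.1 + i * st.2, st.2 - 1)) (0, n)).1, n - m) ∧
    6 * ((PySem.List.pyRange 1 ((m : Int) + 1) 1).foldl
        (fun (st : Int × Int) i => (st.1 + i * st.2, st.2 - 1)) (0, n)).1
      = 3 * (n + 1) * m * (m + 1) - m * (m + 1) * (2 * m + 1) := by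
  induction m with
  | zero =>
      rw [PySem.List.pyRange_one_eq_nil (by norm_num)]
      simp
  | succ k ih =>
      have hsplit : PySem.List.pyRange 1 (((k + 1 : Nat) : Int) + 1) 1
          = PySem.List.pyRange 1 ((k : Int) + 1) 1 ++ [(k : Int) + 1] := by
        have hc : ((k + 1 : Nat) : Int) + 1 = ((k : Int) + 1) + 1 := by push_cast; ring
        rw [hc, PySem.List.pyRange_one_succ_right (by omega : (1:Int) ≤ (k : Int) + 1)]
      rw [hsplit, List.foldl_append]
      obtain ⟨hpair, hsum⟩ := ih
      rw [hpair]
      refine ⟨?_, ?_⟩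
      · simp [List.foldl]
        ring
      · simp [List.foldl]
        push_cast
        linear_combination hsum

-- ===== VERDICT (by name: the statement is the Claim_ definition above) =====
theorem productoDeMedios_spec : Claim_equal_productoDeMedios := by
  intro n _
  unfold Spec_productoDeMedios productoDeMedios productoDeMedios_alt
  simp only [mitad_eq]
  set m : Int := PySem.Int.floordiv (n + 1) 2 with hm
  by_cases hlt : m < 1
  · rw [PySem.List.pyRange_one_eq_nil (by omega)]
    simp [hlt]
  · have hm0 : 0 ≤ m := by omega
    obtain ⟨k, hk⟩ : ∃ k : Nat, m = (k : Int) := ⟨m.toNat, (Int.toNat_of_nonneg hm0).symm⟩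
    obtain ⟨hpair, hsum⟩ := loop_closed k n
    rw [hk, hpair, if_neg (by omega)]
    -- floor divisions are exact: 2 ∣ m*(m+1), hence 2 ∣ X and (from the sum identity) 6 ∣ Y
    have h2 : (2 : Int) ∣ (n + 1) * (k : Int) * ((k : Int) + 1) := by
      have hmm : (2 : Int) ∣ (k : Int) * ((k : Int) + 1) := (Int.even_mul_succ_self _).two_dvd
      have h' : (n + 1) * (k : Int) * ((k : Int) + 1) = (n + 1) * ((k : Int) * ((k : Int) + 1)) := by ring
      rw [h']; exact hmm.mul_left _
    rw [PySem.Int.floordiv_eq_ediv_of_pos (by norm_num : (0:Int) < 2),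
        PySem.Int.floordiv_eq_ediv_of_pos (by norm_num : (0:Int) < 6)]
    set s := ((PySem.List.pyRange 1 ((k : Int) + 1) 1).foldl
        (fun (st : Int × Int) i => (st.1 + i * st.2, st.2 - 1)) (0, n)).1 with hs
    have hsum' : 6 * s = 3 * ((n + 1) * (k : Int) * ((k : Int) + 1))
        - (k : Int) * ((k : Int) + 1) * (2 * (k : Int) + 1) := by
      rw [hs]; linear_combination hsum
    generalize hXg : (n + 1) * (k : Int) * ((k : Int) + 1) = X at h2 hsum' ⊢
    generalize hYg : (k : Int) * ((k : Int) + 1) * (2 * (k : Int) + 1) = Y at hsum' ⊢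
    omega
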